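-- pv_equiv track=rewrite | github.com/ThinkingDobby/PythonProgramming | codetree/samsung_sw_test/놀이기구 탑승.py | whole_search
-- ===== SOURCE A (Python) =====
-- dirs = [(-1, 0), (1, 0), (0, -1), (0, 1)]
--
-- def adjacent_search(memo, i, j, like):
--     like_cnt = empty_cnt = 0
--
--     n = len(memo)
--     for r, c in dirs:
--         ni = i + r
--         nj = j + c
--         if 0 <= ni < n and 0 <= nj < n:
--             if memo[ni][nj] == 0:
--                 empty_cnt += 1
--             elif memo[ni][nj] in like:
--                 like_cnt += 1
--
--     return like_cnt, empty_cnt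
--
-- def whole_search(memo):
--     mv = -1
--     mi = mj = -1
--     n = len(memo)
--     for i in range(n):
--         for j in range(n):
--             if memo[i][j] == 0:
--                 result = adjacent_search(memo, i, j, [])[1]
--                 if result > mv:
--                     mv = result
--                     mi = i
--                     mj = j
--
--     return mi, mj
-- ===== SOURCE B (Python) =====
-- dirs = [(-1, 0), (1, 0), (0, -1), (0, 1)]
--
-- def whole_search(memo):
--     n = len(memo)
--     # scatter pass: each empty cell adds 1 to every in-bounds orthogonal neighbour's count
--     cnt = {}
--     for a in range(n):
--         for b in range(n):
--             if memo[a][b] == 0: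
--                 for r, c in dirs:
--                     ni, nj = a + r, b + c
--                     if 0 <= ni < n and 0 <= nj < n:
--                         cnt[(ni, nj)] = cnt.get((ni, nj), 0) + 1
--     # selection pass: first empty cell (row-major) whose count strictly beats the running max
--     mv, mi, mj = -1, -1, -1
--     for i in range(n):
--         for j in range(n):
--             if memo[i][j] == 0 and cnt.get((i, j), 0) > mv:
--                 mv = cnt.get((i, j), 0)
--                 mi, mj = i, j
--     return mi, mj
-- ===== Notes on version B (the rewrite author's own statement) =====
-- stated objective: alternative
-- what changed: Replaces A's per-empty-cell gather (calling adjacent_search to count each cell's empty neighbours) by a scatter pass that lets every empty cell increment its in-bounds neighbours' counts in a dict, followed by a separate row-major selection pass over the precomputed counts.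
-- outside the precondition, e.g. on whole_search([[0, 1], [1]]): A raises IndexError, B raises IndexError
import Mathlib
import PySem

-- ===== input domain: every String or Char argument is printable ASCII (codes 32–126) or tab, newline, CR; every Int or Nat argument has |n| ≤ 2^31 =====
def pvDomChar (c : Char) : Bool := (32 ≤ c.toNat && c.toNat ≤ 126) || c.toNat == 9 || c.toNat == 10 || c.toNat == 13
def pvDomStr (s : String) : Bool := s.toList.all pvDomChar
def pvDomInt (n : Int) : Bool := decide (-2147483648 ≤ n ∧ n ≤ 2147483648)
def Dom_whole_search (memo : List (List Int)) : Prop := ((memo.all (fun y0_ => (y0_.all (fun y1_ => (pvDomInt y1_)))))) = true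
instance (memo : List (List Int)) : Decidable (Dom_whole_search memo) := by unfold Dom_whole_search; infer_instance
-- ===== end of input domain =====

-- B replaces A's per-empty-cell neighbour gather by a scatter pass accumulating counts
-- in a dict plus a separate selection pass (objective: alternative, same O(n^2) cost).

-- ===== PORT A =====
def pvDirs : List (Int × Int) := [(-1, 0), (1, 0), (0, -1), (0, 1)]

-- grid access memo[i][j]; under Pre_ every access is in bounds, so the defaults are never used
def pvAt (memo : List (List Int)) (i j : Int) : Int :=
  PySem.List.pyGetD (PySem.List.pyGetD memo i []) j 0

def adjacent_search (memo : List (List Int)) (i j : Int) (like : List Int) : Int × Int :=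
  let n : Int := memo.length
  pvDirs.foldl (fun (st : Int × Int) rc =>
    let ni := i + rc.1
    let nj := j + rc.2
    if 0 ≤ ni ∧ ni < n ∧ 0 ≤ nj ∧ nj < n then
      if pvAt memo ni nj = 0 then (st.1, st.2 + 1)
      else if pvAt memo ni nj ∈ like then (st.1 + 1, st.2)
      else st
    else st) (0, 0)

def whole_search (memo : List (List Int)) : Int × Int :=
  let n : Int := memo.length
  let st := (PySem.List.pyRange 0 n 1).foldl (fun st i =>
    (PySem.List.pyRange 0 n 1).foldl (fun (st : Int × Int × Int) j =>
      if pvAt memo i j = 0 then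
        let result := (adjacent_search memo i j []).2
        if result > st.1 then (result, i, j) else st
      else st) st) (-1, -1, -1)
  (st.2.1, st.2.2)

-- ===== PORT B =====
def pvIncr (d : PySem.Dict (Int × Int) Int) (k : Int × Int) : PySem.Dict (Int × Int) Int :=
  d.insert k (d.getD k 0 + 1)

def whole_search_alt (memo : List (List Int)) : Int × Int :=
  let n : Int := memo.length
  let cnt := (PySem.List.pyRange 0 n 1).foldl (fun d a =>
    (PySem.List.pyRange 0 n 1).foldl (fun (d : PySem.Dict (Int × Int) Int) b =>
      if pvAt memo a b = 0 then
        pvDirs.foldl (fun d rc =>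
          let ni := a + rc.1
          let nj := b + rc.2
          if 0 ≤ ni ∧ ni < n ∧ 0 ≤ nj ∧ nj < n then pvIncr d (ni, nj) else d) d
      else d) d) PySem.Dict.empty
  let st := (PySem.List.pyRange 0 n 1).foldl (fun st i =>
    (PySem.List.pyRange 0 n 1).foldl (fun (st : Int × Int × Int) j =>
      if pvAt memo i j = 0 ∧ cnt.getD (i, j) 0 > st.1 then (cnt.getD (i, j) 0, i, j) else st) st)
    (-1, -1, -1)
  (st.2.1, st.2.2)

-- ===== PRECONDITION & SPEC =====
-- Pre_ excludes exactly the ragged grids (some row shorter than the grid height) on which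
-- Python A raises IndexError; there A returns nothing, so nothing is claimed.
def Pre_whole_search (memo : List (List Int)) : Prop :=
  ∀ row ∈ memo, memo.length ≤ row.length
instance (memo : List (List Int)) : Decidable (Pre_whole_search memo) := by
  unfold Pre_whole_search; infer_instance

def pvWitness_whole_search : List (List Int) := [[0, 1], [1, 0]]

def Spec_whole_search (memo : List (List Int)) (out : Int × Int) : Prop := out = whole_search_alt memo
instance (memo : List (List Int)) (out : Int × Int) : Decidable (Spec_whole_search memo out) := by unfold Spec_whole_search; infer_instance

-- ===== CLAIM (what is proved, stated in full; the proofs are below) =====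
def Claim_equal_whole_search : Prop := ∀ (memo : List (List Int)), Dom_whole_search memo → Pre_whole_search memo → Spec_whole_search memo (whole_search memo)

-- ===== LEMMAS AND PROOFS =====

def pvInb (n : Int) (k : Int × Int) : Bool := decide (0 ≤ k.1 ∧ k.1 < n ∧ 0 ≤ k.2 ∧ k.2 < n)

def pvTargets (n a b : Int) : List (Int × Int) :=
  (pvDirs.map (fun rc => (a + rc.1, b + rc.2))).filter (pvInb n)

def pvEvents (memo : List (List Int)) (n : Int) : List (Int × Int) :=
  (PySem.List.pyRange 0 n 1).flatMap (fun a =>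
    (PySem.List.pyRange 0 n 1).flatMap (fun b =>
      if pvAt memo a b = 0 then pvTargets n a b else []))

lemma pv_sum_zero {α : Type} (l : List α) (f : α → Nat) (h : ∀ a ∈ l, f a = 0) :
    (l.map f).sum = 0 := by
  induction l with
  | nil => simp
  | cons hd tl ih =>
    simp only [List.map_cons, List.sum_cons, h hd (List.mem_cons_self)]
    rw [Nat.zero_add]
    exact ih (fun a ha => h a (List.mem_cons_of_mem _ ha))

lemma pv_sum_point {α : Type} [DecidableEq α] (l : List α) (hl : l.Nodup) (x : α) (f : α → Nat) :
    (l.map (fun a => if a = x then f a else 0)).sum = if x ∈ l then f x else 0 := by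
  induction l with
  | nil => simp
  | cons hd tl ih =>
    rcases List.nodup_cons.mp hl with ⟨hnm, hnd⟩
    by_cases hx : hd = x
    · subst hx
      have ht : (tl.map (fun a => if a = hd then f a else 0)).sum = 0 := by
        refine pv_sum_zero _ _ (fun a ha => ?_)
        simp only [ite_eq_right_iff]
        intro he; exact absurd (he ▸ ha) hnm
      simp [ht]
    · have hxm : (x ∈ hd :: tl) ↔ (x ∈ tl) := by
        simp only [List.mem_cons, or_iff_right_iff_imp]
        intro he; exact absurd he.symm hx
      simp only [List.map_cons, List.sum_cons, if_neg hx, ih hnd, hxm, Nat.zero_add]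

lemma pv_sum_add {α : Type} (l : List α) (f g : α → Nat) :
    (l.map (fun x => f x + g x)).sum = (l.map f).sum + (l.map g).sum := by
  induction l with
  | nil => simp
  | cons hd tl ih => simp [ih]; omega

lemma pv_inner_scatter (n a b : Int) (d : PySem.Dict (Int × Int) Int) :
    pvDirs.foldl (fun d rc =>
      if 0 ≤ a + rc.1 ∧ a + rc.1 < n ∧ 0 ≤ b + rc.2 ∧ b + rc.2 < n then
        pvIncr d (a + rc.1, b + rc.2) else d) d
    = (pvTargets n a b).foldl pvIncr d := by
  simp only [pvTargets, pvDirs, pvInb, List.map_cons, List.map_nil, List.filter_cons,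
    List.filter_nil, decide_eq_true_eq, List.foldl_cons, List.foldl_nil]
  split_ifs <;> rfl

lemma pv_cnt_getD (memo : List (List Int)) (n : Int) (k : Int × Int) :
    (((PySem.List.pyRange 0 n 1).foldl (fun d a =>
      (PySem.List.pyRange 0 n 1).foldl (fun (d : PySem.Dict (Int × Int) Int) b =>
        if pvAt memo a b = 0 then
          pvDirs.foldl (fun d rc =>
            if 0 ≤ a + rc.1 ∧ a + rc.1 < n ∧ 0 ≤ b + rc.2 ∧ b + rc.2 < n then
              pvIncr d (a + rc.1, b + rc.2) else d) d
        else d) d) PySem.Dict.empty).getD k 0)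
    = ((pvEvents memo n).count k : Int) := by
  have hcell : ∀ (d : PySem.Dict (Int × Int) Int) (a b : Int),
      List.foldl pvIncr d (if pvAt memo a b = 0 then pvTargets n a b else [])
      = (if pvAt memo a b = 0 then
          pvDirs.foldl (fun d rc =>
            if 0 ≤ a + rc.1 ∧ a + rc.1 < n ∧ 0 ≤ b + rc.2 ∧ b + rc.2 < n then
              pvIncr d (a + rc.1, b + rc.2) else d) d
        else d) := by
    intro d a b
    by_cases hE : pvAt memo a b = 0
    · simp only [hE, if_pos, pv_inner_scatter]
    · simp [hE]
  have hfold : List.foldl pvIncr PySem.Dict.empty (pvEvents memo n)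
      = (PySem.List.pyRange 0 n 1).foldl (fun d a =>
          (PySem.List.pyRange 0 n 1).foldl (fun (d : PySem.Dict (Int × Int) Int) b =>
            if pvAt memo a b = 0 then
              pvDirs.foldl (fun d rc =>
                if 0 ≤ a + rc.1 ∧ a + rc.1 < n ∧ 0 ≤ b + rc.2 ∧ b + rc.2 < n then
                  pvIncr d (a + rc.1, b + rc.2) else d) d
            else d) d) PySem.Dict.empty := by
    rw [pvEvents, List.foldl_flatMap]
    simp only [List.foldl_flatMap, hcell]
  rw [← hfold]
  have hip : List.foldl pvIncr PySem.Dict.empty (pvEvents memo n)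
      = List.foldl (fun (d : PySem.Dict (Int × Int) Int) x => d.insert x (d.getD x 0 + 1))
          PySem.Dict.empty (pvEvents memo n) := rfl
  rw [hip, PySem.Dict.getD_foldl_insert_add_one, PySem.Dict.getD_empty, zero_add]

lemma pv_count_cell (memo : List (List Int)) (n a b : Int) (k : Int × Int) :
    (if pvAt memo a b = 0 then pvTargets n a b else []).count k
    = (if (a + -1, b + 0) = k ∧ pvInb n (a + -1, b + 0) = true ∧ pvAt memo a b = 0 then 1 else 0)
    + (if (a + 1, b + 0) = k ∧ pvInb n (a + 1, b + 0) = true ∧ pvAt memo a b = 0 then 1 else 0)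
    + (if (a + 0, b + -1) = k ∧ pvInb n (a + 0, b + -1) = true ∧ pvAt memo a b = 0 then 1 else 0)
    + (if (a + 0, b + 1) = k ∧ pvInb n (a + 0, b + 1) = true ∧ pvAt memo a b = 0 then 1 else 0) := by
  by_cases hE : pvAt memo a b = 0
  · simp only [hE, if_true, pvTargets, pvDirs, List.map_cons, List.map_nil,
      List.filter_cons, List.filter_nil, and_true]
    split_ifs <;> simp_all [List.count_nil]
  · simp [hE]

lemma pv_dir_sum (memo : List (List Int)) (n i j r c : Int)
    (hi : 0 ≤ i ∧ i < n) (hj : 0 ≤ j ∧ j < n) :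
    ((PySem.List.pyRange 0 n 1).map (fun a => ((PySem.List.pyRange 0 n 1).map (fun b =>
      if (a + r, b + c) = ((i, j) : Int × Int) ∧ pvInb n (a + r, b + c) = true ∧ pvAt memo a b = 0 then 1 else 0)).sum)).sum
    = if 0 ≤ i - r ∧ i - r < n ∧ 0 ≤ j - c ∧ j - c < n ∧ pvAt memo (i - r) (j - c) = 0 then 1 else 0 := by
  have hnd : (PySem.List.pyRange 0 n 1).Nodup := PySem.List.nodup_pyRange_one 0 n
  have hterm : ∀ a b : Int,
      (if (a + r, b + c) = ((i, j) : Int × Int) ∧ pvInb n (a + r, b + c) = true ∧ pvAt memo a b = 0 then (1:Nat) else 0)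
      = (if b = j - c then (if a = i - r then (if pvAt memo a b = 0 then 1 else 0) else 0) else 0) := by
    intro a b
    by_cases hb : b = j - c
    · by_cases ha : a = i - r
      · subst hb; subst ha
        have hp : ((i - r + r, j - c + c) = ((i, j) : Int × Int)) := by
          simp only [Prod.mk.injEq]; constructor <;> ring
        have hinb : pvInb n (i - r + r, j - c + c) = true := by
          simp only [pvInb, decide_eq_true_eq]
          refine ⟨by omega, by omega, by omega, by omega⟩
        have hinb2 : pvInb n (i, j) = true := by
          simp only [pvInb, decide_eq_true_eq]
          exact ⟨hi.1, hi.2, hj.1, hj.2⟩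
        simp [hinb2]
      · have hno : ¬((a + r, b + c) = ((i, j) : Int × Int) ∧ pvInb n (a + r, b + c) = true ∧ pvAt memo a b = 0) := by
          rintro ⟨hp, -, -⟩
          have h1 := congrArg Prod.fst hp
          simp only at h1
          omega
        rw [if_neg hno, if_pos hb, if_neg ha]
    · have hno : ¬((a + r, b + c) = ((i, j) : Int × Int) ∧ pvInb n (a + r, b + c) = true ∧ pvAt memo a b = 0) := by
        rintro ⟨hp, -, -⟩
        have h2 := congrArg Prod.snd hp
        simp only at h2
        omega
      rw [if_neg hno, if_neg hb]
  simp only [hterm]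
  have hin : ∀ a : Int, ((PySem.List.pyRange 0 n 1).map (fun b =>
      if b = j - c then (if a = i - r then (if pvAt memo a b = 0 then (1:Nat) else 0) else 0) else 0)).sum
      = if (j - c) ∈ PySem.List.pyRange 0 n 1 then
          (if a = i - r then (if pvAt memo a (j - c) = 0 then 1 else 0) else 0) else 0 :=
    fun a => pv_sum_point _ hnd _ _
  simp only [hin]
  by_cases hy : (j - c) ∈ PySem.List.pyRange 0 n 1
  · simp only [if_pos hy]
    rw [pv_sum_point _ hnd (i - r) (fun a => if pvAt memo a (j - c) = 0 then 1 else 0)]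
    rw [PySem.List.mem_pyRange_one] at hy
    by_cases hx : (i - r) ∈ PySem.List.pyRange 0 n 1
    · rw [if_pos hx]
      rw [PySem.List.mem_pyRange_one] at hx
      split_ifs <;> first | rfl | tauto
    · rw [if_neg hx]
      rw [PySem.List.mem_pyRange_one] at hx
      rw [if_neg (by rintro ⟨h1, h2, -⟩; exact hx ⟨h1, h2⟩)]
  · simp only [if_neg hy]
    rw [pv_sum_zero _ _ (fun a _ => rfl)]
    rw [PySem.List.mem_pyRange_one] at hy
    rw [if_neg (by rintro ⟨-, -, h3, h4, -⟩; exact hy ⟨h3, h4⟩)]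

lemma pv_cast_ite (P : Prop) [Decidable P] : (((if P then 1 else 0 : Nat)) : Int) = if P then 1 else 0 := by
  split_ifs <;> rfl

lemma pv_ite_ite (P Q : Prop) [Decidable P] [Decidable Q] (x y : Int) :
    (if P then (if Q then y else x) else x) = x + (if P ∧ Q then y - x else 0) := by
  split_ifs <;> simp_all

lemma pv_gather (memo : List (List Int)) (i j : Int) :
    (adjacent_search memo i j []).2
    = (if (0 ≤ i + -1 ∧ i + -1 < (memo.length : Int) ∧ 0 ≤ j ∧ j < (memo.length : Int)) ∧ pvAt memo (i + -1) j = 0 then 1 else 0)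
    + (if (0 ≤ i + 1 ∧ i + 1 < (memo.length : Int) ∧ 0 ≤ j ∧ j < (memo.length : Int)) ∧ pvAt memo (i + 1) j = 0 then 1 else 0)
    + (if (0 ≤ i ∧ i < (memo.length : Int) ∧ 0 ≤ j + -1 ∧ j + -1 < (memo.length : Int)) ∧ pvAt memo i (j + -1) = 0 then 1 else 0)
    + (if (0 ≤ i ∧ i < (memo.length : Int) ∧ 0 ≤ j + 1 ∧ j + 1 < (memo.length : Int)) ∧ pvAt memo i (j + 1) = 0 then 1 else 0) := by
  simp only [adjacent_search, pvDirs, List.foldl_cons, List.foldl_nil, List.not_mem_nil,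
    if_false, apply_ite (Prod.snd : Int × Int → Int), pv_ite_ite, add_sub_cancel_left,
    add_zero, zero_add]
  norm_num

lemma pv_count_eq_gather (memo : List (List Int)) (i j : Int)
    (hi : 0 ≤ i ∧ i < (memo.length : Int)) (hj : 0 ≤ j ∧ j < (memo.length : Int)) :
    ((pvEvents memo memo.length).count (i, j) : Int) = (adjacent_search memo i j []).2 := by
  simp only [pvEvents, List.count_flatMap, Function.comp_def, pv_count_cell, pv_sum_add]
  rw [pv_dir_sum memo _ i j (-1) 0 hi hj, pv_dir_sum memo _ i j 1 0 hi hj,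
    pv_dir_sum memo _ i j 0 (-1) hi hj, pv_dir_sum memo _ i j 0 1 hi hj]
  rw [pv_gather]
  simp only [Nat.cast_add, pv_cast_ite]
  simp only [sub_neg_eq_add, sub_zero, ← sub_eq_add_neg, and_assoc]
  ring

-- ===== VERDICT (by name: the statement is the Claim_ definition above) =====
theorem whole_search_spec : Claim_equal_whole_search := by
  intro memo _hD _hP
  unfold Spec_whole_search
  show whole_search memo = whole_search_alt memo
  simp only [whole_search, whole_search_alt]
  refine congrArg (fun st : Int × Int × Int => (st.2.1, st.2.2)) ?_
  refine PySem.List.foldl_congr_mem _ _ _ _ ?_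
  intro acc i hi
  refine PySem.List.foldl_congr_mem _ _ _ _ ?_
  intro acc' j hj
  rw [PySem.List.mem_pyRange_one] at hi hj
  have hc := pv_cnt_getD memo (memo.length : Int) (i, j)
  have hg := pv_count_eq_gather memo i j ⟨hi.1, hi.2⟩ ⟨hj.1, hj.2⟩
  rw [hc, hg]
  split_ifs <;> first | rfl | tauto
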